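-- pv_equiv track=rewrite | github.com/swilsonmelo/Google-codeJam | 2019/qualifications2019/A/A.py | convertLeft
-- ===== SOURCE A (Python) =====
-- def convertLeft(n):
--     m = [i for i in str(n)]
--     pos = len(m)-1
--     t = True
--     for i in range(len(m)):
--         if(not t):
--             m[i] = "0"
--         if(m[i] == "4" and t):
--             m[i] = "5"
--             t = False
--     return int("".join(m))
-- ===== SOURCE B (Python) =====
-- def convertLeft(n):
--     s = str(n)
--     i = s.find('4')
--     if i != -1:
--         s = s[:i] + '5' + '0' * (len(s) - i - 1)
--     return int(s)
-- ===== Notes on version B (the rewrite author's own statement) =====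
-- stated objective: simpler
-- what changed: Replaces A's flag-threaded per-character loop (zeroing under a mutable flag) with a single find of the first '4' and one slice-based string construction; no loop at all in B.
import Mathlib
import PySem

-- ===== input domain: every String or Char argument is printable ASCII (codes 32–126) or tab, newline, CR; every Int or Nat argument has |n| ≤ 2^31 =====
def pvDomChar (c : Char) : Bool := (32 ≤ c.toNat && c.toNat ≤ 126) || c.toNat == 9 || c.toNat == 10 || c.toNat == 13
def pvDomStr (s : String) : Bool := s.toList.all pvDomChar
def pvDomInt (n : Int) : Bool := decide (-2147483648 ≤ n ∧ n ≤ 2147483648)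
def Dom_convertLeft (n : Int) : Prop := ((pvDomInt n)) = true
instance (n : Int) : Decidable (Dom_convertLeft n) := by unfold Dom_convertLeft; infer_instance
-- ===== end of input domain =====

-- B replaces A's flag-threaded per-character loop with one find of the first '4'
-- plus a single slice construction (objective: simpler).

-- ===== PORT A =====
-- the for-loop over range(len(m)): processed elements are emitted in order, the
-- flag t is threaded exactly as in A (first branch zeroes when the flag is down,
-- second branch fires on '4' while the flag is up)
def convertLeftLoop : List Char → Bool → List Char
  | [], _ => []
  | c :: rest, t =>
    let c1 := if t = false then '0' else c
    if c1 = '4' ∧ t = true then '5' :: convertLeftLoop rest false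
    else c1 :: convertLeftLoop rest t

def convertLeft (n : Int) : Int :=
  let m := (PySem.Int.toStr n).toList          -- [i for i in str(n)]
  let _pos : Int := (m.length : Int) - 1       -- pos = len(m)-1 (unused in A)
  let m' := convertLeftLoop m true             -- the for-loop with flag t = True
  (PySem.Int.ofStr? (String.ofList m')).getD 0     -- int("".join(m)); int() always succeeds here

-- ===== PORT B =====
def convertLeft_alt (n : Int) : Int :=
  let s := PySem.Int.toStr n
  let i := PySem.Str.find s "4"
  let s' := if i ≠ -1 then
      String.ofList (PySem.Chars.slice s.toList none (some i) ++ ['5']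
        ++ PySem.List.pyRepeat ['0'] ((PySem.Str.len s : Int) - i - 1))
    else s
  (PySem.Int.ofStr? s').getD 0                 -- int(s); always succeeds here

-- ===== PRECONDITION & SPEC =====
def Spec_convertLeft (n : Int) (out : Int) : Prop := out = convertLeft_alt n
instance (n : Int) (out : Int) : Decidable (Spec_convertLeft n out) := by unfold Spec_convertLeft; infer_instance

-- ===== CLAIM (what is proved, stated in full; the proofs are below) =====
def Claim_equal_convertLeft : Prop := ∀ (n : Int), Dom_convertLeft n → Spec_convertLeft n (convertLeft n)

-- ===== LEMMAS AND PROOFS =====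

-- with the flag down, the loop zeroes everything
theorem convertLeftLoop_false (cs : List Char) :
    convertLeftLoop cs false = List.replicate cs.length '0' := by
  induction cs with
  | nil => rfl
  | cons c rest ih => simp [convertLeftLoop, ih, List.replicate_succ]

-- with no '4' present the loop is the identity
theorem convertLeftLoop_no4 (cs : List Char) (h : '4' ∉ cs) :
    convertLeftLoop cs true = cs := by
  induction cs with
  | nil => rfl
  | cons c rest ih =>
    simp only [List.mem_cons, not_or] at h
    simp [convertLeftLoop, Ne.symm h.1, ih h.2]

-- with the first '4' at position j the loop keeps the prefix, writes '5', zeroes the rest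
theorem convertLeftLoop_at (cs : List Char) (j : Nat) (hj : j < cs.length)
    (h4 : cs[j] = '4') (hmin : ∀ i, (hi : i < j) → cs[i]'(by omega) ≠ '4') :
    convertLeftLoop cs true =
      cs.take j ++ '5' :: List.replicate (cs.length - j - 1) '0' := by
  induction cs generalizing j with
  | nil => simp at hj
  | cons c rest ih =>
    cases j with
    | zero =>
      simp only [List.getElem_cons_zero] at h4
      subst h4
      simp [convertLeftLoop, convertLeftLoop_false]
    | succ k =>
      have hc : c ≠ '4' := hmin 0 (by omega)
      simp only [List.getElem_cons_succ] at h4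
      have := ih k (by simpa using hj) h4
        (fun i hi => by simpa using hmin (i+1) (by omega))
      simp [convertLeftLoop, hc, this, List.take_succ_cons]

-- a singleton is an infix iff its element occurs
theorem singleton_infix_iff (c : Char) (l : List Char) : [c] <:+: l ↔ c ∈ l := by
  constructor
  · intro h; exact h.subset (List.mem_singleton_self c)
  · intro h
    obtain ⟨l₁, l₂, rfl⟩ := List.append_of_mem h
    exact ⟨l₁, l₂, by simp⟩

-- a singleton is a prefix of a drop iff that position holds the element
theorem singleton_prefix_drop (c : Char) (l : List Char) (j : Nat) :
    [c] <+: l.drop j ↔ l[j]? = some c := by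
  by_cases hj : j < l.length
  · rw [List.drop_eq_getElem_cons hj, List.getElem?_eq_getElem hj]
    constructor
    · rintro ⟨t, ht⟩
      simp only [List.singleton_append, List.cons.injEq] at ht
      simp [ht.1]
    · intro hd
      exact ⟨List.drop (j+1) l, by rw [List.singleton_append, Option.some.inj hd]⟩
  · rw [List.drop_eq_nil_of_le (by omega), List.getElem?_eq_none_iff.2 (by omega)]
    simp

-- the two loop results coincide as character lists, for ANY character list
theorem convertLeft_core (cs : List Char) :
    convertLeftLoop cs true =
      (if PySem.Chars.find cs ['4'] ≠ -1 then
        PySem.Chars.slice cs none (some (PySem.Chars.find cs ['4'])) ++ ['5']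
          ++ PySem.List.pyRepeat ['0'] ((cs.length : Int) - PySem.Chars.find cs ['4'] - 1)
      else cs) := by
  by_cases hmem : '4' ∈ cs
  · have hne : PySem.Chars.find cs ['4'] ≠ -1 :=
      (PySem.Chars.find_ne_neg_one_iff cs ['4']).2 ((singleton_infix_iff '4' cs).2 hmem)
    have hnn : 0 ≤ PySem.Chars.find cs ['4'] :=
      (PySem.Chars.find_nonneg_iff cs ['4']).2 ((singleton_infix_iff '4' cs).2 hmem)
    obtain ⟨hpre, hmin⟩ := PySem.Chars.find_spec hnn
    set j := (PySem.Chars.find cs ['4']).toNat with hjdef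
    have hj4 : cs[j]? = some '4' := (singleton_prefix_drop '4' cs j).1 hpre
    obtain ⟨hjlt, hj4'⟩ := List.getElem?_eq_some_iff.1 hj4
    have hfind_le : PySem.Chars.find cs ['4'] ≤ (cs.length : Int) :=
      PySem.Chars.find_le_length cs ['4']
    have hmin' : ∀ i, (hi : i < j) → cs[i]'(by omega) ≠ '4' := by
      intro i hi hcontra
      exact hmin i hi ((singleton_prefix_drop '4' cs i).2
        (by simp [List.getElem?_eq_getElem (by omega : i < cs.length), hcontra]))
    rw [convertLeftLoop_at cs j hjlt hj4' hmin']
    have hfj : PySem.Chars.find cs ['4'] = (j : Int) := by omega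
    rw [if_pos hne, hfj, PySem.Chars.slice_eq_listSlice, PySem.List.slice_to_natCast]
    have hcast : ((cs.length : Int) - (j : Int) - 1) = ((cs.length - j - 1 : Nat) : Int) := by
      omega
    rw [hcast, PySem.List.pyRepeat_singleton]
    simp
  · have heq : PySem.Chars.find cs ['4'] = -1 :=
      (PySem.Chars.find_eq_neg_one_iff cs ['4']).2
        (fun h => hmem ((singleton_infix_iff '4' cs).1 h))
    rw [convertLeftLoop_no4 cs hmem, if_neg (by simp [heq])]

-- ===== VERDICT (by name: the statement is the Claim_ definition above) =====
theorem convertLeft_spec : Claim_equal_convertLeft := by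
  intro n _
  show convertLeft n = convertLeft_alt n
  unfold convertLeft convertLeft_alt
  have h4 : "4".toList = ['4'] := rfl
  simp only [PySem.Str.find_eq, PySem.Str.len_eq,
    PySem.Int.toList_toStr, h4, PySem.Chars.slice_eq_listSlice]
  rw [convertLeft_core]
  split_ifs with h
  · simp only [PySem.Chars.slice_eq_listSlice]
  · simp [PySem.Int.ofStr?, PySem.Int.toStr]
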